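-- pv_equiv track=rewrite | github.com/heleownae/AlQuerythm | 041회차/ban_JNE.py | solution
-- ===== SOURCE A (Python) =====
-- def solution(id_list, report, k):
--     report_dict = {user: set() for user in id_list}
--
--     for r in report:
--         reporter, reported = r.split()
--         report_dict[reporter].add(reported)
--
--     report_count = {user: 0 for user in id_list}
--     for reporters in report_dict.values():
--         for reported in reporters:
--             report_count[reported] += 1
--
--     suspended_users = {user for user, count in report_count.items() if count >= k}
--
--     mail_count = [0] * len(id_list)
--     for i, user in enumerate(id_list):
--         for reported in report_dict[user]:
--             if reported in suspended_users:
--                 mail_count[i] += 1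
--
--     return mail_count
-- ===== SOURCE B (Python) =====
-- def solution(id_list, report, k):
--     # One flat deduped list of (reporter, reported) pairs instead of a dict of sets;
--     # count reports per user from it, then count each user's mails in one comprehension.
--     pairs = list(dict.fromkeys(tuple(r.split()) for r in report))
--     counts = {}
--     for _, reported in pairs:
--         counts[reported] = counts.get(reported, 0) + 1
--     return [sum(1 for a, b in pairs if a == u and counts[b] >= k) for u in id_list]
-- ===== Notes on version B (the rewrite author's own statement) =====
-- stated objective: simpler
-- what changed: Replaces A's dict-of-sets plus three separate passes by one flat insertion-ordered deduped (reporter, reported) pair list, a single report counter built from it, and a per-user comprehension that counts mails directly.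
-- outside the precondition, e.g. on solution(['a'], ['a b'], 1): A raises KeyError, B returns [1]; on solution(['a'], ['a'], 1): A raises ValueError, B raises ValueError
import Mathlib
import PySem

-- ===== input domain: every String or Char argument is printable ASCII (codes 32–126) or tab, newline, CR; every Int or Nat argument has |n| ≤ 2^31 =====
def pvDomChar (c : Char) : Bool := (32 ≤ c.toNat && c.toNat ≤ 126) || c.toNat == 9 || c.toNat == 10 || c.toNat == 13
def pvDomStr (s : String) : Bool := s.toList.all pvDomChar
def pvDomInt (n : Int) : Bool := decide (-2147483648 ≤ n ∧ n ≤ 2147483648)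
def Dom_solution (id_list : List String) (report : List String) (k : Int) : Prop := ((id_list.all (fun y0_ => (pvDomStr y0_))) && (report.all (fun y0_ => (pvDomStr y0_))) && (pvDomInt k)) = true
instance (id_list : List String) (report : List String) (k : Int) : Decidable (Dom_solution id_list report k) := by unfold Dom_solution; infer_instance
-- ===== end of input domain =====

-- B replaces A's dict-of-sets + three passes by one flat deduped pair list, a counter over it,
-- and a per-user count — simpler, same results on Pre_ (reports that split into two known ids).

-- shared parsing step: 'reporter, reported = r.split()' / 'tuple(r.split())'
-- (exact under Pre_solution, which guarantees exactly two tokens)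
def pvSplit2 (r : String) : String × String :=
  match PySem.Str.split₀ r with
  | [a, b] => (a, b)
  | _ => ("", "")

-- ===== PORT A =====
def solution (id_list : List String) (report : List String) (k : Int) : List Int :=
  -- report_dict = {user: set() for user in id_list}
  let rd0 : PySem.Dict String (PySem.Set String) :=
    id_list.foldl (fun d u => d.insert u PySem.Set.empty) PySem.Dict.empty
  -- for r in report: reporter, reported = r.split(); report_dict[reporter].add(reported)
  let rd : PySem.Dict String (PySem.Set String) :=
    report.foldl (fun d r =>
      d.modify (pvSplit2 r).1 PySem.Set.empty (fun s => PySem.Set.add s (pvSplit2 r).2)) rd0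
  -- report_count = {user: 0 for user in id_list}
  let rc0 : PySem.Dict String Int :=
    id_list.foldl (fun d u => d.insert u 0) PySem.Dict.empty
  -- for reporters in report_dict.values(): for reported in reporters: report_count[reported] += 1
  let rc : PySem.Dict String Int :=
    rd.values.foldl (fun d s => s.foldl (fun d x => d.modify x 0 (· + 1)) d) rc0
  -- suspended_users = {user for user, count in report_count.items() if count >= k}
  let susp : PySem.Set String :=
    PySem.Set.ofList ((rc.items.filter (fun p => decide (k ≤ p.2))).map (·.1))
  -- mail_count[i] accumulated per position i of id_list
  id_list.map (fun u =>
    (rd.getD u PySem.Set.empty).foldl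
      (fun m v => if PySem.Set.contains susp v then m + 1 else m) (0 : Int))

-- ===== PORT B =====
def solution_alt (id_list : List String) (report : List String) (k : Int) : List Int :=
  -- pairs = list(dict.fromkeys(tuple(r.split()) for r in report))
  let pairs : List (String × String) := PySem.List.dedup (report.map pvSplit2)
  -- counts[reported] = counts.get(reported, 0) + 1  over pairs
  let counts : PySem.Dict String Int :=
    pairs.foldl (fun d p => d.insert p.2 (d.getD p.2 0 + 1)) PySem.Dict.empty
  -- [sum(1 for a, b in pairs if a == u and counts[b] >= k) for u in id_list]
  id_list.map (fun u =>
    pairs.foldl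
      (fun acc p => if p.1 == u && decide (k ≤ counts.getD p.2 0) then acc + 1 else acc) (0 : Int))

-- ===== PRECONDITION & SPEC =====
-- Pre_ excludes inputs on which A raises: a report string whose whitespace split is not exactly
-- two tokens (ValueError on unpacking) or contains a token not in id_list (KeyError).
def Pre_solution (id_list : List String) (report : List String) (k : Int) : Prop :=
  ∀ r ∈ report, (PySem.Str.split₀ r).length = 2 ∧ ∀ t ∈ PySem.Str.split₀ r, t ∈ id_list
instance (id_list : List String) (report : List String) (k : Int) : Decidable (Pre_solution id_list report k) := by unfold Pre_solution; infer_instance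

def pvWitness_solution : List String × List String × Int := (["muzi", "frodo"], ["muzi frodo", "frodo muzi"], 1)

def Spec_solution (id_list : List String) (report : List String) (k : Int) (out : List Int) : Prop := out = solution_alt id_list report k
instance (id_list : List String) (report : List String) (k : Int) (out : List Int) : Decidable (Spec_solution id_list report k out) := by unfold Spec_solution; infer_instance

-- ===== CLAIM (what is proved, stated in full; the proofs are below) =====
def Claim_equal_solution : Prop := ∀ (id_list : List String) (report : List String) (k : Int), Dom_solution id_list report k → Pre_solution id_list report k → Spec_solution id_list report k (solution id_list report k)

-- ===== LEMMAS AND PROOFS =====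

-- a dict built by inserting only the constant value c answers c everywhere
theorem pv_getD_insert_const {ν : Type} (c : ν) (xs : List String) (d : PySem.Dict String ν)
    (h : ∀ u, d.getD u c = c) (v : String) :
    (xs.foldl (fun d x => d.insert x c) d).getD v c = c := by
  induction xs generalizing d with
  | nil => exact h v
  | cons x t ih =>
      simp only [List.foldl_cons]
      exact ih _ (fun u => by rw [PySem.Dict.getD_insert]; split <;> [rfl; exact h u])

theorem pv_rd_getD (l : List (String × String)) (d : PySem.Dict String (PySem.Set String)) (u : String) :
    (l.foldl (fun d p => d.modify p.1 PySem.Set.empty (fun s => PySem.Set.add s p.2)) d).getD u PySem.Set.empty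
      = PySem.Set.update (d.getD u PySem.Set.empty) ((l.filter (fun p => p.1 == u)).map (·.2)) := by
  induction l generalizing d with
  | nil => simp [PySem.Set.update]
  | cons p t ih =>
      simp only [List.foldl_cons, List.filter_cons]
      rw [ih]
      by_cases h : p.1 = u
      · simp [h, PySem.Set.update_cons]
      · have hb : (p.1 == u) = false := by simp [h]
        simp [hb, PySem.Dict.getD_modify, Ne.symm h]

theorem pv_update_of_forall_mem (s : PySem.Set String) (xs : List String)
    (h : ∀ x ∈ xs, x ∈ s) : PySem.Set.update s xs = s := by
  rw [PySem.Set.update_eq_append_filter]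
  have hnil : List.filter (fun y => !s.contains y) (PySem.Set.ofList xs) = [] := by
    apply List.filter_eq_nil_iff.mpr
    intro y hy
    have hys : y ∈ s := h y ((PySem.Set.mem_ofList xs y).mp hy)
    simp only [(PySem.Set.contains_iff s y).mpr hys, Bool.not_true, Bool.false_eq_true,
      not_false_eq_true]
  rw [hnil, List.append_nil]

theorem pv_cnt_fold_getD (sets : List (List String)) (d : PySem.Dict String Int) (v : String) :
    (sets.foldl (fun d s => s.foldl (fun d x => d.modify x 0 (· + 1)) d) d).getD v 0
      = d.getD v 0 + ((sets.map (fun s => (s.count v : Int))).sum) := by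
  induction sets generalizing d with
  | nil => simp
  | cons s t ih =>
      simp only [List.foldl_cons, List.map_cons, List.sum_cons]
      rw [ih, PySem.Dict.getD_foldl_modify_add_one]
      ring

theorem pv_cnt_fold_keys_mem (sets : List (List String)) (d : PySem.Dict String Int) (v : String)
    (h : v ∈ d.keys) :
    v ∈ (sets.foldl (fun d s => s.foldl (fun d x => d.modify x 0 (· + 1)) d) d).keys := by
  induction sets generalizing d with
  | nil => exact h
  | cons s t ih =>
      simp only [List.foldl_cons]
      exact ih _ (by rw [PySem.Dict.keys_foldl_modify]; exact (PySem.Set.mem_update _ _ _).mpr (Or.inl h))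

theorem pv_cnt_fold_keys_nodup (sets : List (List String)) (d : PySem.Dict String Int)
    (h : d.keys.Nodup) :
    (sets.foldl (fun d s => s.foldl (fun d x => d.modify x 0 (· + 1)) d) d).keys.Nodup := by
  induction sets generalizing d with
  | nil => exact h
  | cons s t ih =>
      simp only [List.foldl_cons]
      exact ih _ (by rw [PySem.Dict.keys_foldl_modify]; exact PySem.Set.nodup_update _ _ h)

theorem pv_sum_ite_zero (t : List String) (a : String) (c : Int) (h : a ∉ t) :
    (t.map (fun u => if a == u then c else 0)).sum = 0 := by
  induction t with
  | nil => rfl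
  | cons x t ih =>
      simp only [List.map_cons, List.sum_cons]
      have hx : (a == x) = false := by simp; rintro rfl; exact h (List.mem_cons_self ..)
      rw [hx, if_neg (by simp), ih (fun hm => h (List.mem_cons_of_mem _ hm))]
      simp

theorem pv_sum_ite_single (U : List String) (a : String) (c : Int) (hU : U.Nodup) (ha : a ∈ U) :
    (U.map (fun u => if a == u then c else 0)).sum = c := by
  induction U with
  | nil => cases ha
  | cons x t ih =>
      simp only [List.map_cons, List.sum_cons]
      rcases List.mem_cons.mp ha with rfl | hm
      · rw [if_pos (by simp), pv_sum_ite_zero t a c (List.Nodup.notMem hU)]; ring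
      · have hx : (a == x) = false := by
          simp; rintro rfl; exact (List.Nodup.notMem hU) hm
        rw [hx, if_neg (by simp), ih (List.Nodup.of_cons hU) hm]; ring

theorem pv_ofList_filter_map (l : List (String × String)) (u : String) :
    PySem.Set.ofList ((l.filter (fun p => p.1 == u)).map (·.2))
      = ((PySem.Set.ofList l).filter (fun p => p.1 == u)).map (·.2) := by
  induction l using List.reverseRecOn with
  | nil => rfl
  | append_singleton t p ih =>
      rw [List.filter_append, List.map_append, PySem.Set.ofList_append_singleton]
      by_cases hm : p ∈ PySem.Set.ofList t
      · rw [PySem.Set.add_of_mem hm]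
        have hpt : p ∈ t := (PySem.Set.mem_ofList t p).mp hm
        by_cases hu : p.1 = u
        · have : List.filter (fun p => p.1 == u) [p] = [p] := by simp [hu]
          rw [this]
          simp only [List.map_cons, List.map_nil]
          rw [PySem.Set.ofList_append_singleton, ih, PySem.Set.add_of_mem]
          rw [← ih]
          exact (PySem.Set.mem_ofList _ _).mpr
            (List.mem_map_of_mem (List.mem_filter.mpr ⟨hpt, by simp [hu]⟩))
        · have : List.filter (fun p => p.1 == u) [p] = [] := by simp [hu]
          rw [this]; simpa using ih
      · rw [PySem.Set.add_of_not_mem hm]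
        have hpt : p ∉ t := fun hx => hm ((PySem.Set.mem_ofList t p).mpr hx)
        rw [List.filter_append, List.map_append]
        by_cases hu : p.1 = u
        · have h1 : List.filter (fun p => p.1 == u) [p] = [p] := by simp [hu]
          rw [h1]
          simp only [List.map_cons, List.map_nil]
          rw [PySem.Set.ofList_append_singleton, ih, PySem.Set.add_of_not_mem]
          rw [← ih]
          intro hmem
          rcases (PySem.Set.mem_ofList _ _).mp hmem with hmem2
          rcases List.mem_map.mp hmem2 with ⟨q, hq, hq2⟩
          rcases List.mem_filter.mp hq with ⟨hqt, hqu⟩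
          have : q = p := by
            have h1 : q.1 = p.1 := by have := of_decide_eq_true hqu; simp_all
            exact Prod.ext h1 hq2
          exact hpt (this ▸ hqt)
        · have h1 : List.filter (fun p => p.1 == u) [p] = [] := by simp [hu]
          rw [h1]; simpa using ih

theorem pv_count_exchange (U : List String) (P : List (String × String)) (v : String)
    (hU : U.Nodup) (hP : ∀ p ∈ P, p.1 ∈ U) :
    (U.map (fun u => (((P.filter (fun p => p.1 == u)).map (·.2)).count v : Int))).sum
      = ((P.map (·.2)).count v : Int) := by
  induction P with
  | nil => simp
  | cons p t ih =>
      have hp1 : p.1 ∈ U := hP p (List.mem_cons_self ..)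
      have ht : ∀ q ∈ t, q.1 ∈ U := fun q hq => hP q (List.mem_cons_of_mem _ hq)
      have hterm : ∀ u : String,
          ((((p :: t).filter (fun p => p.1 == u)).map (·.2)).count v : Int)
            = (if p.1 == u then (if p.2 == v then (1:Int) else 0) else 0)
              + (((t.filter (fun p => p.1 == u)).map (·.2)).count v : Int) := by
        intro u
        by_cases hu : p.1 = u
        · simp [hu, List.count_cons]
          by_cases hv : p.2 = v <;> simp [hv] <;> push_cast <;> ring
        · simp [hu]
      simp only [hterm]
      rw [PySem.List.sum_map_add_int, pv_sum_ite_single U p.1 _ hU hp1, ih ht]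
      simp only [List.map_cons, List.count_cons]
      by_cases hv : p.2 = v <;> simp [hv] <;> push_cast <;> ring

-- ===== VERDICT (by name: the statement is the Claim_ definition above) =====
theorem solution_spec : Claim_equal_solution := by
  intro id_list report k _hdom hpre
  unfold Pre_solution at hpre
  unfold Spec_solution
  simp only [solution, solution_alt]
  -- abbreviations
  set l : List (String × String) := report.map pvSplit2 with hl
  set P : List (String × String) := PySem.Set.ofList l with hP
  -- membership facts from Pre_
  have hmem : ∀ p ∈ l, p.1 ∈ id_list ∧ p.2 ∈ id_list := by
    intro p hp
    rcases List.mem_map.mp hp with ⟨r, hr, rfl⟩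
    rcases hpre r hr with ⟨hlen, hin⟩
    rcases hsp : PySem.Str.split₀ r with _ | ⟨a, _ | ⟨b, _ | _⟩⟩ <;> rw [hsp] at hlen <;> simp at hlen
    have : pvSplit2 r = (a, b) := by simp [pvSplit2, hsp]
    rw [this]
    rw [hsp] at hin
    exact ⟨hin a (by simp), hin b (by simp)⟩
  have hmemP : ∀ p ∈ P, p.1 ∈ id_list ∧ p.2 ∈ id_list := by
    intro p hp; exact hmem p ((PySem.Set.mem_ofList l p).mp hp)
  -- the report_dict fold, rewritten over l
  have e1 : report.foldl (fun d r =>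
        d.modify (pvSplit2 r).1 PySem.Set.empty (fun s => PySem.Set.add s (pvSplit2 r).2))
        (id_list.foldl (fun d u => d.insert u PySem.Set.empty) PySem.Dict.empty)
      = l.foldl (fun d p => d.modify p.1 PySem.Set.empty (fun s => PySem.Set.add s p.2))
        (id_list.foldl (fun d u => d.insert u PySem.Set.empty) PySem.Dict.empty) := by
    rw [hl, List.foldl_map]
  rw [e1]
  -- per-user stored set
  have hS : ∀ w, ((l.foldl (fun d p => d.modify p.1 PySem.Set.empty (fun s => PySem.Set.add s p.2))
        (id_list.foldl (fun d u => d.insert u PySem.Set.empty) PySem.Dict.empty)).getD w PySem.Set.empty)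
      = (P.filter (fun p => p.1 == w)).map (·.2) := by
    intro w
    rw [pv_rd_getD, pv_getD_insert_const PySem.Set.empty id_list PySem.Dict.empty
      (fun u => PySem.Dict.getD_empty u PySem.Set.empty) w]
    rw [show (PySem.Set.empty : PySem.Set String) = [] from rfl, PySem.Set.update_nil_left]
    rw [pv_ofList_filter_map, hP]
  -- keys of report_dict
  have hrd0keys : ((id_list.foldl (fun d u => d.insert u PySem.Set.empty) PySem.Dict.empty)
      : PySem.Dict String (PySem.Set String)).keys = PySem.Set.ofList id_list := by
    rw [PySem.Dict.keys_foldl_insert id_list (fun _ _ => PySem.Set.empty) PySem.Dict.empty,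
      PySem.Dict.keys_empty, PySem.Set.update_nil_left]
  have hrdkeys : ((l.foldl (fun d p => d.modify p.1 PySem.Set.empty (fun s => PySem.Set.add s p.2))
        (id_list.foldl (fun d u => d.insert u PySem.Set.empty) PySem.Dict.empty))).keys
      = PySem.Set.ofList id_list := by
    rw [PySem.Dict.keys_foldl_modify_key l (fun p => p.1) PySem.Set.empty
      (fun _ p s => PySem.Set.add s p.2), hrd0keys]
    apply pv_update_of_forall_mem
    intro x hx
    rcases List.mem_map.mp hx with ⟨p, hp, rfl⟩
    exact (PySem.Set.mem_ofList _ _).mpr (hmem p hp).1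
  have hrdnodup : ((l.foldl (fun d p => d.modify p.1 PySem.Set.empty (fun s => PySem.Set.add s p.2))
        (id_list.foldl (fun d u => d.insert u PySem.Set.empty) PySem.Dict.empty))).keys.Nodup := by
    rw [hrdkeys]; exact PySem.Set.nodup_ofList id_list
  -- values of report_dict
  have hvals : ((l.foldl (fun d p => d.modify p.1 PySem.Set.empty (fun s => PySem.Set.add s p.2))
        (id_list.foldl (fun d u => d.insert u PySem.Set.empty) PySem.Dict.empty))).values
      = (PySem.Set.ofList id_list).map (fun w => (P.filter (fun p => p.1 == w)).map (·.2)) := by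
    rw [PySem.Dict.values_eq_map_keys _ hrdnodup PySem.Set.empty, hrdkeys]
    exact List.map_congr_left (fun w _ => hS w)
  -- report_count characterized
  have hrc0keys : ((id_list.foldl (fun d u => d.insert u (0:Int)) PySem.Dict.empty)
      : PySem.Dict String Int).keys = PySem.Set.ofList id_list := by
    rw [PySem.Dict.keys_foldl_insert id_list (fun _ _ => (0:Int)) PySem.Dict.empty,
      PySem.Dict.keys_empty, PySem.Set.update_nil_left]
  have hcntA : ∀ v, ((((l.foldl (fun d p => d.modify p.1 PySem.Set.empty (fun s => PySem.Set.add s p.2))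
        (id_list.foldl (fun d u => d.insert u PySem.Set.empty) PySem.Dict.empty))).values.foldl
        (fun d s => s.foldl (fun d x => d.modify x 0 (· + 1)) d)
        (id_list.foldl (fun d u => d.insert u 0) PySem.Dict.empty)).getD v 0)
      = ((P.map (·.2)).count v : Int) := by
    intro v
    rw [pv_cnt_fold_getD, pv_getD_insert_const (0:Int) id_list PySem.Dict.empty
      (fun u => PySem.Dict.getD_empty u 0) v, hvals, List.map_map]
    rw [zero_add]
    exact pv_count_exchange (PySem.Set.ofList id_list) P v (PySem.Set.nodup_ofList id_list)
      (fun p hp => (PySem.Set.mem_ofList _ _).mpr (hmemP p hp).1)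
  -- report_count keys
  have hrckeys_mem : ∀ v ∈ id_list,
      v ∈ (((l.foldl (fun d p => d.modify p.1 PySem.Set.empty (fun s => PySem.Set.add s p.2))
        (id_list.foldl (fun d u => d.insert u PySem.Set.empty) PySem.Dict.empty))).values.foldl
        (fun d s => s.foldl (fun d x => d.modify x 0 (· + 1)) d)
        (id_list.foldl (fun d u => d.insert u (0:Int)) PySem.Dict.empty)).keys := by
    intro v hv
    exact pv_cnt_fold_keys_mem _ _ v (by rw [hrc0keys]; exact (PySem.Set.mem_ofList _ _).mpr hv)
  have hrcnodup : (((l.foldl (fun d p => d.modify p.1 PySem.Set.empty (fun s => PySem.Set.add s p.2))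
        (id_list.foldl (fun d u => d.insert u PySem.Set.empty) PySem.Dict.empty))).values.foldl
        (fun d s => s.foldl (fun d x => d.modify x 0 (· + 1)) d)
        (id_list.foldl (fun d u => d.insert u (0:Int)) PySem.Dict.empty)).keys.Nodup := by
    exact pv_cnt_fold_keys_nodup _ _ (by rw [hrc0keys]; exact PySem.Set.nodup_ofList id_list)
  -- suspended set membership, for users that are keys of report_count
  have hsusp : ∀ (rc : PySem.Dict String Int), rc.keys.Nodup → ∀ v ∈ rc.keys,
      PySem.Set.contains
        (PySem.Set.ofList ((rc.items.filter (fun p => decide (k ≤ p.2))).map (·.1))) v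
        = decide (k ≤ rc.getD v 0) := by
    intro rc hnd v hv
    rw [PySem.Dict.items_eq_map_keys rc hnd 0]
    by_cases hk : k ≤ rc.getD v 0
    · simp only [hk, decide_true]
      apply (PySem.Set.contains_iff _ _).mpr
      apply (PySem.Set.mem_ofList _ _).mpr
      apply List.mem_map.mpr
      refine ⟨(v, rc.getD v 0), List.mem_filter.mpr ⟨List.mem_map_of_mem hv, by simp [hk]⟩, rfl⟩
    · simp only [hk, decide_false]
      apply Bool.eq_false_iff.mpr
      intro hcon
      have hmm := (PySem.Set.mem_ofList _ _).mp ((PySem.Set.contains_iff _ _).mp hcon)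
      rcases List.mem_map.mp hmm with ⟨pr, hpr, rfl⟩
      rcases List.mem_filter.mp hpr with ⟨hpr1, hpr2⟩
      rcases List.mem_map.mp hpr1 with ⟨w, hw, rfl⟩
      simp only at hpr2
      exact hk (by simpa using hpr2)
  -- B's counter
  have hcntB : ∀ v, ((P.foldl (fun d p => d.insert p.2 (d.getD p.2 0 + 1)) PySem.Dict.empty
      : PySem.Dict String Int).getD v 0) = ((P.map (·.2)).count v : Int) := by
    intro v
    have e2 : (P.foldl (fun d p => d.insert p.2 (d.getD p.2 0 + 1)) PySem.Dict.empty
        : PySem.Dict String Int)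
        = (P.map (·.2)).foldl (fun d x => d.insert x (d.getD x 0 + 1)) PySem.Dict.empty := by
      rw [List.foldl_map]
    rw [e2, PySem.Dict.getD_foldl_insert_add_one, PySem.Dict.getD_empty, zero_add]
  -- final: pointwise over id_list
  apply List.map_congr_left
  intro u hu
  rw [hS u]
  simp only [PySem.List.foldl_count_if, zero_add]
  rw [PySem.List.dedup_eq_ofList]
  congr 1
  rw [List.countP_map]
  rw [List.countP_congr (l := PySem.Set.ofList l)
    (p := fun p => p.1 == u && decide (k ≤ ((PySem.Set.ofList l).foldl
      (fun d p => d.insert p.2 (d.getD p.2 0 + 1)) PySem.Dict.empty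
      : PySem.Dict String Int).getD p.2 0))
    (q := fun p => decide (k ≤ ((PySem.Set.ofList l).foldl
      (fun d p => d.insert p.2 (d.getD p.2 0 + 1)) PySem.Dict.empty
      : PySem.Dict String Int).getD p.2 0) && (p.1 == u))
    (fun p _ => by simp [Bool.and_comm])]
  rw [← List.countP_filter]
  apply List.countP_congr
  intro p hp
  have hpP : p ∈ PySem.Set.ofList l := (List.mem_filter.mp hp).1
  have h2 : p.2 ∈ id_list := (hmemP p hpP).2
  simp only [Function.comp_apply]
  rw [hsusp _ hrcnodup p.2 (hrckeys_mem p.2 h2)]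
  simp only [decide_eq_true_eq]
  rw [hcntA p.2, hcntB p.2]
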